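-- pv_equiv track=rewrite | github.com/stddddd/ERCBench | generation task/InstructERC-dataset/code/main_new2.py | optimize_output
-- ===== SOURCE A (Python) =====
-- def edit_distance(s1, s2):
--     """
--     Calculate the editing distance between two strings
--     """
--     m, n = len(s1), len(s2)
--     dp = [[0] * (n + 1) for _ in range(m + 1)]
--     for i in range(m + 1):
--         dp[i][0] = i
--     for j in range(n + 1):
--         dp[0][j] = j
--     for i in range(1, m + 1):
--         for j in range(1, n + 1):
--             if s1[i - 1] == s2[j - 1]:
--                 dp[i][j] = dp[i - 1][j - 1]
--             else:
--                 dp[i][j] = min(dp[i - 1][j], dp[i][j - 1], dp[i - 1][j - 1]) + 1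
--     return dp[m][n]
--
-- def optimize_output(output, label_set):
--     """
--     Calculate output and label_ Set the editing distance of each label in the set and return the label corresponding to the minimum editing distance
--     """
--     min_distance = float('inf')
--     optimized_output = None
--     for label in label_set:
--         distance = edit_distance(output, label)
--         if distance < min_distance:
--             min_distance = distance
--             optimized_output = label
--     return optimized_output
-- ===== SOURCE B (Python) =====
-- def edit_distance(s1, s2):
--     """Top-down demand-driven edit distance: evaluate the recurrence from
--     (m, n) with an explicit two-phase stack (cells int-encoded as i*w+j,
--     a negative entry marks 'children scheduled') and a memo dict, computing
--     only the cells the recurrence actually demands."""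
--     m, n = len(s1), len(s2)
--     w = n + 1
--     memo = {}
--     stack = [m * w + n]
--     pop = stack.pop
--     push = stack.append
--     while stack:
--         k = pop()
--         if k >= 0:
--             if k in memo:
--                 continue
--             i, j = divmod(k, w)
--             if i == 0:
--                 memo[k] = j
--             elif j == 0:
--                 memo[k] = i
--             else:
--                 push(-k)
--                 if s1[i - 1] == s2[j - 1]:
--                     push(k - w - 1)
--                 else:
--                     push(k - w)
--                     push(k - 1)
--                     push(k - w - 1)
--         else:
--             k = -k
--             if s1[k // w - 1] == s2[k % w - 1]:
--                 memo[k] = memo[k - w - 1]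
--             else:
--                 memo[k] = 1 + min(memo[k - w], memo[k - 1], memo[k - w - 1])
--     return memo[m * w + n]
-- def optimize_output(output, label_set):
--     if not label_set:
--         return None
--     return min(label_set, key=lambda label: edit_distance(output, label))
-- ===== Notes on version B (the rewrite author's own statement) =====
-- stated objective: faster
-- what changed: edit_distance's bottom-up (m+1)x(n+1) matrix fill is replaced by a top-down demand-driven evaluation of the recurrence: an explicit two-phase stack (postorder DFS over int-encoded cells, sign as the expanded flag) with a memo dict, which computes only the cells the recurrence actually demands (on a matching character pair only the diagonal predecessor); the float('inf')/None selection loop becomes a guarded min(label_set, key=...).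
import Mathlib
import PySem

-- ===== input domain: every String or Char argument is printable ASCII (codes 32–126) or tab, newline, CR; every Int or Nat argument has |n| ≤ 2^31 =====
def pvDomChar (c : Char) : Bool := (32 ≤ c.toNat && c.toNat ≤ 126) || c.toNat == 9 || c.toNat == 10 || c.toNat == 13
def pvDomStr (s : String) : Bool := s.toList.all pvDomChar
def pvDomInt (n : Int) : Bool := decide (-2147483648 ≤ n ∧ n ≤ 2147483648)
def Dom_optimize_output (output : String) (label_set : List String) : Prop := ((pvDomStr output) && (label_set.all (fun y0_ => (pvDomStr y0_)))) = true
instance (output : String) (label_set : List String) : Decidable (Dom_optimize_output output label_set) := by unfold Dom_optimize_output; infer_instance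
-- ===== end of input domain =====

-- B replaces A's bottom-up (m+1)×(n+1) edit-distance matrix by a top-down demand-driven
-- evaluation of the same recurrence: an explicit two-phase stack (int-encoded cells, the sign
-- as the 'expanded' flag) with a memo dict, and picks the first minimal label with min(key=...).

-- ===== PORT A =====
-- min(x, y, z) of three naturals, as Python's 3-argument min
def pyMin3 (x y z : Nat) : Nat := min (min x y) z

-- literal port of A's edit_distance: full matrix dp, two init loops, nested fill loops.
-- All Python indices here are loop counters provably in range, so List.set / List.getD
-- are exact ports of Python's list indexing/assignment.
def edit_distance (s1 s2 : String) : Nat :=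
  let a := s1.toList
  let b := s2.toList
  let m := a.length
  let n := b.length
  -- dp = [[0] * (n + 1) for _ in range(m + 1)]
  let dp : List (List Nat) := List.replicate (m+1) (List.replicate (n+1) 0)
  -- for i in range(m + 1): dp[i][0] = i
  let dp := (List.range (m+1)).foldl (fun dp i => dp.set i ((dp.getD i []).set 0 i)) dp
  -- for j in range(n + 1): dp[0][j] = j
  let dp := (List.range (n+1)).foldl (fun dp j => dp.set 0 ((dp.getD 0 []).set j j)) dp
  -- for i in range(1, m + 1): for j in range(1, n + 1): ...
  let dp := (List.range' 1 m).foldl (fun dp i =>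
      (List.range' 1 n).foldl (fun dp j =>
        dp.set i ((dp.getD i []).set j
          (if a.getD (i-1) default = b.getD (j-1) default
           then (dp.getD (i-1) []).getD (j-1) 0
           else pyMin3 ((dp.getD (i-1) []).getD j 0) ((dp.getD i []).getD (j-1) 0)
                  ((dp.getD (i-1) []).getD (j-1) 0) + 1))) dp) dp
  (dp.getD m []).getD n 0

-- literal port of A's optimize_output; min_distance = float('inf') is ported as `none`
-- (compares strictly greater than every distance)
def optimize_output (output : String) (label_set : List String) : Option String :=
  (label_set.foldl (fun (st : Option Nat × Option String) label =>
      let distance := edit_distance output label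
      match st.1 with
      | none => (some distance, some label)
      | some md => if distance < md then (some distance, some label) else st)
    (none, none)).2

-- ===== PORT B =====
-- Python s[idx]: the indices at every use below are proved in range, so IndexError cannot
-- occur and the .getD default is never taken — exact there.
def pvCharAt (xs : List Char) (idx : Int) : Char := (PySem.List.pyGet? xs idx).getD default

-- termination measure for Source B's while loop (head of the list = top of Python's stack)
def edWeight (k : Int) : Nat := if k < 0 then 1 else 4 ^ k.toNat + 1

def edStackW : List Int → Nat
  | [] => 0
  | k :: rest => edWeight k + edStackW rest

lemma edWeight_pos (k : Int) : 1 ≤ edWeight k := by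
  unfold edWeight
  split
  · exact le_refl 1
  · have : 0 < 4 ^ k.toNat := Nat.pow_pos (by norm_num)
    omega

lemma edStackW_pop_lt (k : Int) (rest : List Int) : edStackW rest < edStackW (k :: rest) := by
  have := edWeight_pos k
  simp [edStackW]; omega

lemma edPosFacts (k w : Int) (hw : 1 ≤ w) (h0 : 0 ≤ k)
    (hi : PySem.Int.floordiv k w ≠ 0) (hj : PySem.Int.mod k w ≠ 0) : w + 1 ≤ k := by
  rw [PySem.Int.floordiv_eq_ediv_of_pos (by omega)] at hi
  rw [PySem.Int.mod_eq_emod_of_pos (by omega)] at hj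
  by_contra hcon
  push_neg at hcon
  by_cases hkw : k < w
  · exact hi (Int.ediv_eq_zero_of_lt h0 hkw)
  · have hkeq : k = w := by omega
    subst hkeq
    exact hj Int.emod_self

lemma edWeight_le (x : Int) (K : Nat) (h0 : 0 ≤ x) (h : x.toNat ≤ K) :
    edWeight x ≤ 4 ^ K + 1 := by
  unfold edWeight
  rw [if_neg (by omega)]
  have := Nat.pow_le_pow_right (by norm_num : 1 ≤ 4) h
  omega

lemma edStackW_expand_match_lt (k w : Int) (rest : List Int) (hw : 1 ≤ w) (h0 : 0 ≤ k)
    (hi : PySem.Int.floordiv k w ≠ 0) (hj : PySem.Int.mod k w ≠ 0) :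
    edStackW ((k - w - 1) :: (-k) :: rest) < edStackW (k :: rest) := by
  have hk := edPosFacts k w hw h0 hi hj
  have hK2 : 2 ≤ k.toNat := by omega
  have hneg : edWeight (-k) = 1 := by unfold edWeight; rw [if_pos (by omega)]
  have hc : edWeight (k - w - 1) ≤ 4 ^ (k.toNat - 2) + 1 :=
    edWeight_le _ _ (by omega) (by omega)
  have hk4 : edWeight k = 4 ^ k.toNat + 1 := by unfold edWeight; rw [if_neg (by omega)]
  have hpow : 4 ^ k.toNat = 16 * 4 ^ (k.toNat - 2) := by
    calc 4 ^ k.toNat = 4 ^ (k.toNat - 2 + 2) := by rw [Nat.sub_add_cancel hK2]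
    _ = 4 ^ (k.toNat - 2) * 4 ^ 2 := pow_add 4 _ 2
    _ = 16 * 4 ^ (k.toNat - 2) := by ring
  have ht : 1 ≤ 4 ^ (k.toNat - 2) := Nat.one_le_pow _ _ (by norm_num)
  simp only [edStackW]
  omega

lemma edStackW_expand_mismatch_lt (k w : Int) (rest : List Int) (hw : 1 ≤ w) (h0 : 0 ≤ k)
    (hi : PySem.Int.floordiv k w ≠ 0) (hj : PySem.Int.mod k w ≠ 0) :
    edStackW ((k - w - 1) :: (k - 1) :: (k - w) :: (-k) :: rest) < edStackW (k :: rest) := by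
  have hk := edPosFacts k w hw h0 hi hj
  have hK2 : 2 ≤ k.toNat := by omega
  have hneg : edWeight (-k) = 1 := by unfold edWeight; rw [if_pos (by omega)]
  have hc1 : edWeight (k - w - 1) ≤ 4 ^ (k.toNat - 2) + 1 :=
    edWeight_le _ _ (by omega) (by omega)
  have hc2 : edWeight (k - 1) ≤ 4 ^ (k.toNat - 1) + 1 :=
    edWeight_le _ _ (by omega) (by omega)
  have hc3 : edWeight (k - w) ≤ 4 ^ (k.toNat - 1) + 1 :=
    edWeight_le _ _ (by omega) (by omega)
  have hk4 : edWeight k = 4 ^ k.toNat + 1 := by unfold edWeight; rw [if_neg (by omega)]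
  have hpow : 4 ^ k.toNat = 16 * 4 ^ (k.toNat - 2) := by
    calc 4 ^ k.toNat = 4 ^ (k.toNat - 2 + 2) := by rw [show k.toNat - 2 + 2 = k.toNat by omega]
    _ = 4 ^ (k.toNat - 2) * 4 ^ 2 := pow_add 4 _ 2
    _ = 16 * 4 ^ (k.toNat - 2) := by ring
  have hpow1 : 4 ^ (k.toNat - 1) = 4 * 4 ^ (k.toNat - 2) := by
    calc 4 ^ (k.toNat - 1) = 4 ^ (k.toNat - 2 + 1) := by rw [show k.toNat - 2 + 1 = k.toNat - 1 by omega]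
    _ = 4 ^ (k.toNat - 2) * 4 := pow_succ 4 _
    _ = 4 * 4 ^ (k.toNat - 2) := by ring
  have ht : 1 ≤ 4 ^ (k.toNat - 2) := Nat.one_le_pow _ _ (by norm_num)
  simp only [edStackW]
  omega

-- literal port of Source B's while loop: Python pops/appends at the END of `stack`;
-- here the head of the list is that end (top of the stack).
def edLoopB (s1c s2c : List Char) : List Int → PySem.Dict Int Int → PySem.Dict Int Int
  | [], memo => memo
  | k :: rest, memo =>
    let w : Int := (s2c.length : Int) + 1
    if h0 : 0 ≤ k then
      if memo.contains k then
        edLoopB s1c s2c rest memo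
      else
        let i := PySem.Int.floordiv k w
        let j := PySem.Int.mod k w
        if hi : i = 0 then edLoopB s1c s2c rest (memo.insert k j)
        else if hj : j = 0 then edLoopB s1c s2c rest (memo.insert k i)
        else if pvCharAt s1c (i - 1) = pvCharAt s2c (j - 1) then
          edLoopB s1c s2c ((k - w - 1) :: (-k) :: rest) memo
        else
          edLoopB s1c s2c ((k - w - 1) :: (k - 1) :: (k - w) :: (-k) :: rest) memo
    else
      let k' := -k
      if pvCharAt s1c (PySem.Int.floordiv k' w - 1) = pvCharAt s2c (PySem.Int.mod k' w - 1) then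
        edLoopB s1c s2c rest (memo.insert k' ((memo.get? (k' - w - 1)).getD 0))
      else
        edLoopB s1c s2c rest
          (memo.insert k' (1 + min (min ((memo.get? (k' - w)).getD 0) ((memo.get? (k' - 1)).getD 0))
            ((memo.get? (k' - w - 1)).getD 0)))
termination_by stack => edStackW stack
decreasing_by
  · exact edStackW_pop_lt _ _
  · exact edStackW_pop_lt _ _
  · exact edStackW_pop_lt _ _
  · exact edStackW_expand_match_lt _ _ _ (by omega) h0 hi hj
  · exact edStackW_expand_mismatch_lt _ _ _ (by omega) h0 hi hj
  · exact edStackW_pop_lt _ _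
  · exact edStackW_pop_lt _ _

-- literal port of Source B's edit_distance wrapper; memo[m*w+n] cannot raise KeyError
-- (the key is proved present below), so the .getD 0 is exact.
def distance_alt (s1 s2 : String) : Int :=
  let m := PySem.Str.len s1
  let n := PySem.Str.len s2
  let w := n + 1
  let memo := edLoopB s1.toList s2.toList [m * w + n] PySem.Dict.empty
  (memo.get? (m * w + n)).getD 0

def optimize_output_alt (output : String) (label_set : List String) : Option String :=
  if label_set.isEmpty then none
  else PySem.List.min? label_set (fun label => distance_alt output label)

-- ===== PRECONDITION & SPEC =====
def Spec_optimize_output (output : String) (label_set : List String) (out : Option String) : Prop := out = optimize_output_alt output label_set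
instance (output : String) (label_set : List String) (out : Option String) : Decidable (Spec_optimize_output output label_set out) := by unfold Spec_optimize_output; infer_instance

-- ===== CLAIM (what is proved, stated in full; the proofs are below) =====
def Claim_equal_optimize_output : Prop := ∀ (output : String) (label_set : List String), Dom_optimize_output output label_set → Spec_optimize_output output label_set (optimize_output output label_set)

-- ===== LEMMAS AND PROOFS =====

-- reference recurrence: gref a b i j = edit distance of the first i chars of a and first j of b
def gref (a b : List Char) : Nat → Nat → Nat
  | 0, j => j
  | (i+1), 0 => i+1
  | (i+1), (j+1) =>
    if a.getD i default = b.getD j default then gref a b i j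
    else pyMin3 (gref a b i (j+1)) (gref a b (i+1) j) (gref a b i j) + 1
termination_by i j => (i, j)

def refRow (a b : List Char) (i n : Nat) : List Nat := (List.range (n+1)).map (gref a b i)

lemma gref_zero (a b : List Char) (j : Nat) : gref a b 0 j = j := by
  cases j <;> simp [gref]

lemma gref_succ_zero (a b : List Char) (i : Nat) : gref a b (i+1) 0 = i+1 := by simp [gref]

lemma refRow_zero (a b : List Char) (n : Nat) : refRow a b 0 n = List.range (n+1) := by
  unfold refRow
  rw [List.map_congr_left (fun j _ => gref_zero a b j)]
  simp

lemma refRow_getD (a b : List Char) (i n j : Nat) (h : j < n + 1) :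
    (refRow a b i n).getD j 0 = gref a b i j :=
  PySem.List.getD_map_range _ _ _ _ h

-- ========== B side: the stack machine computes gref ==========

def encI (b : List Char) (i j : Nat) : Int := (i : Int) * ((b.length : Int) + 1) + j

lemma encI_nonneg (b : List Char) (i j : Nat) : 0 ≤ encI b i j := by
  unfold encI; positivity

lemma encI_decode (b : List Char) (i j : Nat) (hj : j ≤ b.length) :
    PySem.Int.floordiv (encI b i j) ((b.length : Int) + 1) = i ∧
    PySem.Int.mod (encI b i j) ((b.length : Int) + 1) = j := by
  have hw : (0 : Int) < (b.length : Int) + 1 := by positivity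
  unfold encI
  rw [PySem.Int.floordiv_eq_ediv_of_pos hw, PySem.Int.mod_eq_emod_of_pos hw]
  have hrw : (i : Int) * ((b.length : Int) + 1) + j = (j : Int) + i * ((b.length : Int) + 1) := by
    ring
  have hjlt : (j : Int) < (b.length : Int) + 1 := by exact_mod_cast Nat.lt_succ_of_le hj
  rw [hrw]
  constructor
  · rw [Int.add_mul_ediv_right _ _ (by omega : ((b.length : Int) + 1) ≠ 0),
      Int.ediv_eq_zero_of_lt (by positivity) hjlt]
    omega
  · simp only [Int.add_mul_emod_self_right]
    exact Int.emod_eq_of_lt (by positivity) hjlt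

lemma encI_inj (b : List Char) (i j i' j' : Nat) (hj : j ≤ b.length) (hj' : j' ≤ b.length)
    (h : encI b i j = encI b i' j') : i = i' ∧ j = j' := by
  have h1 := encI_decode b i j hj
  have h2 := encI_decode b i' j' hj'
  rw [h] at h1
  constructor
  · have := h1.1.symm.trans h2.1; exact_mod_cast this
  · have := h1.2.symm.trans h2.2; exact_mod_cast this

def MemoInv (a b : List Char) (memo : PySem.Dict Int Int) : Prop :=
  ∀ i j, i ≤ a.length → j ≤ b.length → ∀ v, memo.get? (encI b i j) = some v →
    v = (gref a b i j : Int)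

def edDeps (a b : List Char) (i j : Nat) : List Int :=
  if a.getD (i-1) default = b.getD (j-1) default then [encI b (i-1) (j-1)]
  else [encI b (i-1) j, encI b i (j-1), encI b (i-1) (j-1)]

def GoodEntry (a b : List Char) (k : Int) : Prop :=
  (∃ i j, i ≤ a.length ∧ j ≤ b.length ∧ k = encI b i j) ∨
  (∃ i j, 1 ≤ i ∧ i ≤ a.length ∧ 1 ≤ j ∧ j ≤ b.length ∧ k = -(encI b i j))

def StackDeps (a b : List Char) (stack : List Int) (memo : PySem.Dict Int Int) : Prop :=
  ∀ pre i j post, stack = pre ++ (-(encI b i j)) :: post →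
    1 ≤ i → i ≤ a.length → 1 ≤ j → j ≤ b.length →
    ∀ d ∈ edDeps a b i j, memo.contains d = true ∨ d ∈ pre ∨ -d ∈ pre

lemma encI_pos (b : List Char) (i j : Nat) (hi : 1 ≤ i) (hj : 1 ≤ j) : 0 < encI b i j := by
  unfold encI
  have h1 : (1 : Int) ≤ (i : Int) := by exact_mod_cast hi
  have h2 : (1 : Int) ≤ (j : Int) := by exact_mod_cast hj
  nlinarith [Int.natCast_nonneg b.length]

lemma enc_sub_w (b : List Char) (i j : Nat) (hi : 1 ≤ i) :
    encI b i j - ((b.length : Int) + 1) = encI b (i-1) j := by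
  unfold encI
  have : ((i - 1 : Nat) : Int) = (i : Int) - 1 := by
    have : (1 : Int) ≤ (i : Int) := by exact_mod_cast hi
    push_cast [Nat.cast_sub hi]
    ring
  rw [this]
  ring

lemma enc_sub_one (b : List Char) (i j : Nat) (hj : 1 ≤ j) :
    encI b i j - 1 = encI b i (j-1) := by
  unfold encI
  have : ((j - 1 : Nat) : Int) = (j : Int) - 1 := by
    push_cast [Nat.cast_sub hj]
    ring
  rw [this]
  ring

lemma enc_sub_w_one (b : List Char) (i j : Nat) (hi : 1 ≤ i) (hj : 1 ≤ j) :
    encI b i j - ((b.length : Int) + 1) - 1 = encI b (i-1) (j-1) := by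
  rw [enc_sub_w b i j hi, enc_sub_one b (i-1) j hj]

lemma pvCharAt_cast (xs : List Char) (i : Nat) (h1 : 1 ≤ i) (h2 : i ≤ xs.length) :
    pvCharAt xs ((i : Int) - 1) = xs.getD (i-1) default := by
  unfold pvCharAt
  have hcast : (i : Int) - 1 = ((i - 1 : Nat) : Int) := by
    push_cast [Nat.cast_sub h1]
    ring
  rw [hcast, PySem.List.pyGet?_natCast]
  have hlt : i - 1 < xs.length := by omega
  rw [List.getElem?_eq_getElem hlt, List.getD_eq_getElem xs default hlt]
  rfl

lemma edDeps_nonneg (a b : List Char) (i j : Nat) (d : Int) (hd : d ∈ edDeps a b i j) :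
    0 ≤ d := by
  unfold edDeps at hd
  split at hd <;> simp only [List.mem_cons, List.mem_singleton, List.not_mem_nil, or_false] at hd
  · subst hd; exact encI_nonneg b _ _
  · rcases hd with rfl | rfl | rfl <;> exact encI_nonneg b _ _

lemma contains_isSome {κ ν : Type} [BEq κ] [LawfulBEq κ] (d : PySem.Dict κ ν) (k : κ)
    (h : d.contains k = true) : (d.get? k).isSome := by
  rw [PySem.Dict.contains_eq_isSome_get?] at h
  exact h

-- step rewriting lemmas for edLoopB (one per branch of the while body)
lemma step_skip (a b : List Char) (k : Int) (rest : List Int) (memo : PySem.Dict Int Int)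
    (h0 : 0 ≤ k) (hc : memo.contains k = true) :
    edLoopB a b (k :: rest) memo = edLoopB a b rest memo := by
  rw [edLoopB]
  simp only [h0, hc, dif_pos, if_true]

lemma step_base_i0 (a b : List Char) (k : Int) (rest : List Int) (memo : PySem.Dict Int Int)
    (h0 : 0 ≤ k) (hc : ¬ memo.contains k = true)
    (hi : PySem.Int.floordiv k ((b.length : Int) + 1) = 0) :
    edLoopB a b (k :: rest) memo
      = edLoopB a b rest (memo.insert k (PySem.Int.mod k ((b.length : Int) + 1))) := by
  rw [edLoopB]
  simp only [dif_pos h0, if_neg hc, dif_pos hi]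

lemma step_base_j0 (a b : List Char) (k : Int) (rest : List Int) (memo : PySem.Dict Int Int)
    (h0 : 0 ≤ k) (hc : ¬ memo.contains k = true)
    (hi : ¬ PySem.Int.floordiv k ((b.length : Int) + 1) = 0)
    (hj : PySem.Int.mod k ((b.length : Int) + 1) = 0) :
    edLoopB a b (k :: rest) memo
      = edLoopB a b rest (memo.insert k (PySem.Int.floordiv k ((b.length : Int) + 1))) := by
  rw [edLoopB]
  rw [dif_pos h0, if_neg hc, dif_neg hi, dif_pos hj]

lemma step_expand_match (a b : List Char) (k : Int) (rest : List Int) (memo : PySem.Dict Int Int)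
    (h0 : 0 ≤ k) (hc : ¬ memo.contains k = true)
    (hi : ¬ PySem.Int.floordiv k ((b.length : Int) + 1) = 0)
    (hj : ¬ PySem.Int.mod k ((b.length : Int) + 1) = 0)
    (hch : pvCharAt a (PySem.Int.floordiv k ((b.length : Int) + 1) - 1)
         = pvCharAt b (PySem.Int.mod k ((b.length : Int) + 1) - 1)) :
    edLoopB a b (k :: rest) memo
      = edLoopB a b ((k - ((b.length : Int) + 1) - 1) :: (-k) :: rest) memo := by
  rw [edLoopB]
  rw [dif_pos h0, if_neg hc, dif_neg hi, dif_neg hj, if_pos hch]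

lemma step_expand_mismatch (a b : List Char) (k : Int) (rest : List Int) (memo : PySem.Dict Int Int)
    (h0 : 0 ≤ k) (hc : ¬ memo.contains k = true)
    (hi : ¬ PySem.Int.floordiv k ((b.length : Int) + 1) = 0)
    (hj : ¬ PySem.Int.mod k ((b.length : Int) + 1) = 0)
    (hch : ¬ pvCharAt a (PySem.Int.floordiv k ((b.length : Int) + 1) - 1)
         = pvCharAt b (PySem.Int.mod k ((b.length : Int) + 1) - 1)) :
    edLoopB a b (k :: rest) memo
      = edLoopB a b ((k - ((b.length : Int) + 1) - 1) :: (k - 1) :: (k - ((b.length : Int) + 1))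
          :: (-k) :: rest) memo := by
  rw [edLoopB]
  rw [dif_pos h0, if_neg hc, dif_neg hi, dif_neg hj, if_neg hch]

lemma step_resolve_match (a b : List Char) (k : Int) (rest : List Int) (memo : PySem.Dict Int Int)
    (h0 : ¬ 0 ≤ k)
    (hch : pvCharAt a (PySem.Int.floordiv (-k) ((b.length : Int) + 1) - 1)
         = pvCharAt b (PySem.Int.mod (-k) ((b.length : Int) + 1) - 1)) :
    edLoopB a b (k :: rest) memo
      = edLoopB a b rest
          (memo.insert (-k) ((memo.get? (-k - ((b.length : Int) + 1) - 1)).getD 0)) := by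
  rw [edLoopB]
  rw [dif_neg h0, if_pos hch]

lemma step_resolve_mismatch (a b : List Char) (k : Int) (rest : List Int) (memo : PySem.Dict Int Int)
    (h0 : ¬ 0 ≤ k)
    (hch : ¬ pvCharAt a (PySem.Int.floordiv (-k) ((b.length : Int) + 1) - 1)
         = pvCharAt b (PySem.Int.mod (-k) ((b.length : Int) + 1) - 1)) :
    edLoopB a b (k :: rest) memo
      = edLoopB a b rest
          (memo.insert (-k) (1 + min (min ((memo.get? (-k - ((b.length : Int) + 1))).getD 0)
            ((memo.get? (-k - 1)).getD 0)) ((memo.get? (-k - ((b.length : Int) + 1) - 1)).getD 0))) := by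
  rw [edLoopB]
  rw [dif_neg h0, if_neg hch]

-- StackDeps bookkeeping
lemma stackDeps_pop (a b : List Char) (k : Int) (rest : List Int)
    (memo memo' : PySem.Dict Int Int)
    (h : StackDeps a b (k :: rest) memo)
    (hmono : ∀ d : Int, memo.contains d = true → memo'.contains d = true)
    (hk : ∀ d : Int, 0 ≤ d → (d = k ∨ -d = k) → memo'.contains d = true) :
    StackDeps a b rest memo' := by
  intro pre i j post heq hi1 him hj1 hjn d hd
  have hcov := h (k :: pre) i j post (by rw [heq]; rfl) hi1 him hj1 hjn d hd
  have hdnn : 0 ≤ d := edDeps_nonneg a b i j d hd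
  rcases hcov with hmem | hpre | hnpre
  · exact Or.inl (hmono d hmem)
  · rcases List.mem_cons.mp hpre with rfl | hp
    · exact Or.inl (hk d hdnn (Or.inl rfl))
    · exact Or.inr (Or.inl hp)
  · rcases List.mem_cons.mp hnpre with hh | hp
    · exact Or.inl (hk d hdnn (Or.inr hh))
    · exact Or.inr (Or.inr hp)

lemma stackDeps_expand (a b : List Char) (k : Int) (children rest : List Int)
    (memo : PySem.Dict Int Int) (i j : Nat)
    (hke : k = encI b i j) (hjn : j ≤ b.length)
    (h : StackDeps a b (k :: rest) memo)
    (hchild : ∀ d ∈ edDeps a b i j, d ∈ children)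
    (hcpos : ∀ c ∈ children, 0 ≤ c) :
    StackDeps a b (children ++ (-k) :: rest) memo := by
  intro pre i' j' post heq hi1' him' hj1' hjn' d hd
  have hnegneg : -(encI b i' j') < 0 := by
    have := encI_pos b i' j' hi1' hj1'
    omega
  rcases List.append_eq_append_iff.mp heq with ⟨t, hpre, ht⟩ | ⟨t, hch, ht⟩
  · -- pre = children ++ t, (-k) :: rest = t ++ neg :: post
    cases t with
    | nil =>
      simp only [List.nil_append] at ht
      have hneg : -k = -(encI b i' j') := (List.cons_eq_cons.mp ht).1
      have henc : encI b i j = encI b i' j' := by omega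
      obtain ⟨rfl, rfl⟩ : i = i' ∧ j = j' := encI_inj b i j i' j' hjn hjn' henc
      refine Or.inr (Or.inl ?_)
      rw [hpre, List.append_nil]
      exact hchild d hd
    | cons t0 t' =>
      have htc := List.cons_eq_cons.mp ht
      have ht0 : t0 = -k := htc.1.symm
      have hcov := h (k :: t') i' j' post (by rw [htc.2]; rfl) hi1' him' hj1' hjn' d hd
      have hdnn : 0 ≤ d := edDeps_nonneg a b i' j' d hd
      rcases hcov with hmem | hpre2 | hnpre2
      · exact Or.inl hmem
      · rcases List.mem_cons.mp hpre2 with rfl | hp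
        · refine Or.inr (Or.inr ?_)
          rw [hpre, ht0]
          exact List.mem_append.mpr (Or.inr List.mem_cons_self)
        · refine Or.inr (Or.inl ?_)
          rw [hpre, ht0]
          exact List.mem_append.mpr (Or.inr (List.mem_cons_of_mem _ hp))
      · rcases List.mem_cons.mp hnpre2 with hh | hp
        · refine Or.inr (Or.inl ?_)
          rw [hpre, ht0]
          have hdk : d = -k := by omega
          rw [hdk]
          exact List.mem_append.mpr (Or.inr List.mem_cons_self)
        · refine Or.inr (Or.inr ?_)
          rw [hpre, ht0]
          exact List.mem_append.mpr (Or.inr (List.mem_cons_of_mem _ hp))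
  · -- children = pre ++ t, neg :: post = t ++ (-k) :: rest
    cases t with
    | nil =>
      simp only [List.nil_append] at ht
      have hneg : -(encI b i' j') = -k := (List.cons_eq_cons.mp ht).1
      have henc : encI b i j = encI b i' j' := by omega
      obtain ⟨rfl, rfl⟩ : i = i' ∧ j = j' := encI_inj b i j i' j' hjn hjn' henc
      refine Or.inr (Or.inl ?_)
      have hpc : pre = children := by rw [hch, List.append_nil]
      rw [hpc]
      exact hchild d hd
    | cons t0 t' =>
      exfalso
      have ht0 : t0 = -(encI b i' j') := (List.cons_eq_cons.mp ht).1.symm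
      have hmem : t0 ∈ children := by
        rw [hch]
        exact List.mem_append.mpr (Or.inr List.mem_cons_self)
      have := hcpos t0 hmem
      omega

-- the main loop invariant: the memo stays correct, keys persist, and every
-- stack entry's cell ends up memoized
lemma isSome_insert (d : PySem.Dict Int Int) (k v x : Int) (h : (d.get? x).isSome) :
    ((d.insert k v).get? x).isSome := by
  rw [PySem.Dict.get?_insert]
  by_cases hx : x = k
  · rw [if_pos hx]; rfl
  · rw [if_neg hx]; exact h

lemma main_insert_step (a b : List Char) (N : Nat)
    (ih : ∀ (stack : List Int) (memo : PySem.Dict Int Int), edStackW stack ≤ N →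
      (∀ x ∈ stack, GoodEntry a b x) → MemoInv a b memo → StackDeps a b stack memo →
      MemoInv a b (edLoopB a b stack memo) ∧
      (∀ x : Int, (memo.get? x).isSome → ((edLoopB a b stack memo).get? x).isSome) ∧
      (∀ x ∈ stack, ((edLoopB a b stack memo).get? (if x < 0 then -x else x)).isSome))
    (k : Int) (rest : List Int) (memo : PySem.Dict Int Int) (i j : Nat) (v : Int)
    (hkey : (if k < 0 then -k else k) = encI b i j)
    (hjn : j ≤ b.length)
    (hval : v = (gref a b i j : Int))
    (hlerest : edStackW rest ≤ N)
    (hGrest : ∀ x ∈ rest, GoodEntry a b x)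
    (hM : MemoInv a b memo)
    (hD : StackDeps a b (k :: rest) memo) :
    MemoInv a b (edLoopB a b rest (memo.insert (if k < 0 then -k else k) v)) ∧
    (∀ x : Int, (memo.get? x).isSome →
      ((edLoopB a b rest (memo.insert (if k < 0 then -k else k) v)).get? x).isSome) ∧
    (∀ x ∈ k :: rest,
      ((edLoopB a b rest (memo.insert (if k < 0 then -k else k) v)).get? (if x < 0 then -x else x)).isSome) := by
  set key := if k < 0 then -k else k with hkeydef
  have hkey0 : 0 ≤ key := hkey ▸ encI_nonneg b i j
  have hkk : key = k ∨ key = -k := by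
    rw [hkeydef]
    by_cases h : k < 0
    · right; rw [if_pos h]
    · left; rw [if_neg h]
  have hMm : MemoInv a b (memo.insert key v) := by
    intro i' j' hi' hj' u hu
    rw [PySem.Dict.get?_insert] at hu
    by_cases hk2 : encI b i' j' = key
    · rw [if_pos hk2] at hu
      have hu' : u = v := by injection hu with h1; exact h1.symm
      obtain ⟨rfl, rfl⟩ : i = i' ∧ j = j' :=
        encI_inj b i j i' j' hjn hj' (hk2.trans hkey).symm
      rw [hu', hval]
    · rw [if_neg hk2] at hu
      exact hM i' j' hi' hj' u hu
  have hDD : StackDeps a b rest (memo.insert key v) := by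
    refine stackDeps_pop a b k rest memo _ hD ?_ ?_
    · intro d hd
      rw [PySem.Dict.contains_insert]
      simp [hd]
    · intro d hdnn hdk
      have hdkey : d = key := by rcases hdk with rfl | h1 <;> rcases hkk with h2 | h2 <;> omega
      rw [hdkey, PySem.Dict.contains_insert]
      simp
  obtain ⟨hM', hP', hC'⟩ := ih rest (memo.insert key v) hlerest hGrest hMm hDD
  refine ⟨hM', fun x hx => hP' x (isSome_insert memo key v x hx), fun x hx => ?_⟩
  rcases List.mem_cons.mp hx with rfl | hx2
  · exact hP' key (by rw [PySem.Dict.get?_insert_self]; rfl)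
  · exact hC' x hx2

lemma edLoopB_main (a b : List Char) : ∀ (N : Nat) (stack : List Int) (memo : PySem.Dict Int Int),
    edStackW stack ≤ N →
    (∀ k ∈ stack, GoodEntry a b k) →
    MemoInv a b memo →
    StackDeps a b stack memo →
    MemoInv a b (edLoopB a b stack memo) ∧
    (∀ x : Int, (memo.get? x).isSome → ((edLoopB a b stack memo).get? x).isSome) ∧
    (∀ k ∈ stack, ((edLoopB a b stack memo).get? (if k < 0 then -k else k)).isSome) := by
  intro N
  induction N with
  | zero =>
    intro stack memo hle hG hM hD
    cases stack with
    | nil => rw [edLoopB]; exact ⟨hM, fun x h => h, by simp⟩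
    | cons k rest =>
      exfalso
      have h1 := edWeight_pos k
      have h2 : edWeight k + edStackW rest ≤ 0 := by simpa [edStackW] using hle
      omega
  | succ N ih =>
    intro stack memo hle hG hM hD
    cases stack with
    | nil => rw [edLoopB]; exact ⟨hM, fun x h => h, by simp⟩
    | cons k rest =>
      have hGrest : ∀ x ∈ rest, GoodEntry a b x := fun x hx => hG x (List.mem_cons_of_mem _ hx)
      have hwk := edWeight_pos k
      have hle' : edWeight k + edStackW rest ≤ N + 1 := by simpa [edStackW] using hle
      have hlerest : edStackW rest ≤ N := by omega
      have hw1 : (1 : Int) ≤ (b.length : Int) + 1 := by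
        have := Int.natCast_nonneg b.length
        omega
      rcases hG k List.mem_cons_self with ⟨i, j, him, hjn, hke⟩ | ⟨i, j, hi1, him, hj1, hjn, hke⟩
      · -- unexpanded entry: k = encI b i j
        have h0 : 0 ≤ k := hke ▸ encI_nonneg b i j
        have hknn : ¬ k < 0 := by omega
        have hdec := encI_decode b i j hjn
        have hfd : PySem.Int.floordiv k ((b.length : Int) + 1) = (i : Int) := by
          rw [hke]; exact hdec.1
        have hmd : PySem.Int.mod k ((b.length : Int) + 1) = (j : Int) := by
          rw [hke]; exact hdec.2
        by_cases hc : memo.contains k = true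
        · -- already memoized: pop and continue
          rw [step_skip a b k rest memo h0 hc]
          have hD' : StackDeps a b rest memo :=
            stackDeps_pop a b k rest memo memo hD (fun _ hd => hd)
              (fun d hdnn hdk => by
                have : d = k := by rcases hdk with rfl | h1 <;> omega
                rw [this]; exact hc)
          obtain ⟨hM', hP', hC'⟩ := ih rest memo hlerest hGrest hM hD'
          refine ⟨hM', hP', fun x hx => ?_⟩
          rcases List.mem_cons.mp hx with rfl | hx2
          · rw [if_neg hknn]
            exact hP' x (contains_isSome memo x hc)
          · exact hC' x hx2
        · by_cases hi0 : i = 0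
          · -- first row: memo[k] = j
            have hfd0 : PySem.Int.floordiv k ((b.length : Int) + 1) = 0 := by
              rw [hfd, hi0]; rfl
            rw [step_base_i0 a b k rest memo h0 hc hfd0]
            have hstep := main_insert_step a b N ih k rest memo i j
              (PySem.Int.mod k ((b.length : Int) + 1))
              (by rw [if_neg hknn]; exact hke) hjn
              (by rw [hmd, hi0, gref_zero]) hlerest hGrest hM hD
            rw [if_neg hknn] at hstep
            exact hstep
          · by_cases hj0 : j = 0
            · -- first column: memo[k] = i
              have hfd0 : ¬ PySem.Int.floordiv k ((b.length : Int) + 1) = 0 := by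
                rw [hfd]
                exact_mod_cast hi0
              have hmd0 : PySem.Int.mod k ((b.length : Int) + 1) = 0 := by
                rw [hmd, hj0]; rfl
              rw [step_base_j0 a b k rest memo h0 hc hfd0 hmd0]
              have hgr : gref a b i 0 = i := by
                obtain ⟨i0, rfl⟩ : ∃ i0, i = i0 + 1 := ⟨i - 1, by omega⟩
                exact gref_succ_zero a b i0
              have hstep := main_insert_step a b N ih k rest memo i j
                (PySem.Int.floordiv k ((b.length : Int) + 1))
                (by rw [if_neg hknn]; exact hke) hjn
                (by rw [hfd, hj0, hgr]) hlerest hGrest hM hD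
              rw [if_neg hknn] at hstep
              exact hstep
            · -- interior cell: expand
              have hi1 : 1 ≤ i := by omega
              have hj1 : 1 ≤ j := by omega
              have hfd0 : ¬ PySem.Int.floordiv k ((b.length : Int) + 1) = 0 := by
                rw [hfd]; exact_mod_cast hi0
              have hmd0 : ¬ PySem.Int.mod k ((b.length : Int) + 1) = 0 := by
                rw [hmd]; exact_mod_cast hj0
              have hkpos : 0 < k := hke ▸ encI_pos b i j hi1 hj1
              have hc1 : k - ((b.length : Int) + 1) - 1 = encI b (i-1) (j-1) := by
                rw [hke]; exact enc_sub_w_one b i j hi1 hj1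
              have hc2 : k - 1 = encI b i (j-1) := by
                rw [hke]; exact enc_sub_one b i j hj1
              have hc3 : k - ((b.length : Int) + 1) = encI b (i-1) j := by
                rw [hke]; exact enc_sub_w b i j hi1
              by_cases hch : a.getD (i-1) default = b.getD (j-1) default
              · -- matching characters: push marker and the diagonal dependency
                have hchp : pvCharAt a (PySem.Int.floordiv k ((b.length : Int) + 1) - 1)
                    = pvCharAt b (PySem.Int.mod k ((b.length : Int) + 1) - 1) := by
                  rw [hfd, hmd, pvCharAt_cast a i hi1 him, pvCharAt_cast b j hj1 hjn]
                  exact hch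
                rw [step_expand_match a b k rest memo h0 hc hfd0 hmd0 hchp]
                have hGnew : ∀ x ∈ (k - ((b.length : Int) + 1) - 1) :: (-k) :: rest,
                    GoodEntry a b x := by
                  intro x hx
                  rcases List.mem_cons.mp hx with rfl | hx2
                  · exact Or.inl ⟨i-1, j-1, by omega, by omega, hc1⟩
                  rcases List.mem_cons.mp hx2 with rfl | hx3
                  · exact Or.inr ⟨i, j, hi1, him, hj1, hjn, by rw [hke]⟩
                  · exact hGrest x hx3
                have hDnew : StackDeps a b
                    ((k - ((b.length : Int) + 1) - 1) :: (-k) :: rest) memo := by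
                  have := stackDeps_expand a b k [k - ((b.length : Int) + 1) - 1] rest memo i j
                    hke hjn hD
                    (fun d hd => by
                      unfold edDeps at hd
                      rw [if_pos hch] at hd
                      simp only [List.mem_singleton] at hd
                      rw [hd, ← hc1]
                      exact List.mem_singleton.mpr rfl)
                    (fun c hcmem => by
                      simp only [List.mem_singleton] at hcmem
                      rw [hcmem, hc1]
                      exact encI_nonneg b _ _)
                  exact this
                have hlenew : edStackW ((k - ((b.length : Int) + 1) - 1) :: (-k) :: rest) ≤ N := by
                  have := edStackW_expand_match_lt k ((b.length : Int) + 1) rest hw1 h0 hfd0 hmd0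
                  have hh : edStackW (k :: rest) ≤ N + 1 := hle
                  omega
                obtain ⟨hM', hP', hC'⟩ := ih _ memo hlenew hGnew hM hDnew
                refine ⟨hM', hP', fun x hx => ?_⟩
                rcases List.mem_cons.mp hx with rfl | hx2
                · have hcov := hC' (-x) (List.mem_cons_of_mem _ List.mem_cons_self)
                  rw [if_pos (by omega : -x < 0)] at hcov
                  rw [if_neg hknn]
                  simpa using hcov
                · exact hC' x (List.mem_cons_of_mem _ (List.mem_cons_of_mem _ hx2))
              · -- differing characters: push marker and the three dependencies
                have hchp : ¬ pvCharAt a (PySem.Int.floordiv k ((b.length : Int) + 1) - 1)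
                    = pvCharAt b (PySem.Int.mod k ((b.length : Int) + 1) - 1) := by
                  rw [hfd, hmd, pvCharAt_cast a i hi1 him, pvCharAt_cast b j hj1 hjn]
                  exact hch
                rw [step_expand_mismatch a b k rest memo h0 hc hfd0 hmd0 hchp]
                have hGnew : ∀ x ∈ (k - ((b.length : Int) + 1) - 1) :: (k - 1)
                    :: (k - ((b.length : Int) + 1)) :: (-k) :: rest, GoodEntry a b x := by
                  intro x hx
                  rcases List.mem_cons.mp hx with rfl | hx2
                  · exact Or.inl ⟨i-1, j-1, by omega, by omega, hc1⟩
                  rcases List.mem_cons.mp hx2 with rfl | hx3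
                  · exact Or.inl ⟨i, j-1, by omega, by omega, hc2⟩
                  rcases List.mem_cons.mp hx3 with rfl | hx4
                  · exact Or.inl ⟨i-1, j, by omega, by omega, hc3⟩
                  rcases List.mem_cons.mp hx4 with rfl | hx5
                  · exact Or.inr ⟨i, j, hi1, him, hj1, hjn, by rw [hke]⟩
                  · exact hGrest x hx5
                have hDnew : StackDeps a b ((k - ((b.length : Int) + 1) - 1) :: (k - 1)
                    :: (k - ((b.length : Int) + 1)) :: (-k) :: rest) memo := by
                  have := stackDeps_expand a b k
                    [k - ((b.length : Int) + 1) - 1, k - 1, k - ((b.length : Int) + 1)] rest memo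
                    i j hke hjn hD
                    (fun d hd => by
                      unfold edDeps at hd
                      rw [if_neg hch] at hd
                      simp only [List.mem_cons, List.not_mem_nil, or_false] at hd
                      rcases hd with rfl | rfl | rfl
                      · rw [← hc3]; simp
                      · rw [← hc2]; simp
                      · rw [← hc1]; simp)
                    (fun c hcmem => by
                      simp only [List.mem_cons, List.not_mem_nil, or_false] at hcmem
                      rcases hcmem with rfl | rfl | rfl
                      · rw [hc1]; exact encI_nonneg b _ _
                      · rw [hc2]; exact encI_nonneg b _ _
                      · rw [hc3]; exact encI_nonneg b _ _)
                  exact this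
                have hlenew : edStackW ((k - ((b.length : Int) + 1) - 1) :: (k - 1)
                    :: (k - ((b.length : Int) + 1)) :: (-k) :: rest) ≤ N := by
                  have := edStackW_expand_mismatch_lt k ((b.length : Int) + 1) rest hw1 h0 hfd0 hmd0
                  have hh : edStackW (k :: rest) ≤ N + 1 := hle
                  omega
                obtain ⟨hM', hP', hC'⟩ := ih _ memo hlenew hGnew hM hDnew
                refine ⟨hM', hP', fun x hx => ?_⟩
                rcases List.mem_cons.mp hx with rfl | hx2
                · have hcov := hC' (-x) (by
                    refine List.mem_cons_of_mem _ (List.mem_cons_of_mem _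
                      (List.mem_cons_of_mem _ List.mem_cons_self)))
                  rw [if_pos (by omega : -x < 0)] at hcov
                  rw [if_neg hknn]
                  simpa using hcov
                · exact hC' x (by
                    refine List.mem_cons_of_mem _ (List.mem_cons_of_mem _
                      (List.mem_cons_of_mem _ (List.mem_cons_of_mem _ hx2))))
      · -- expanded marker: k = -(encI b i j), all dependencies are memoized
        have hkpos : 0 < encI b i j := encI_pos b i j hi1 hj1
        have h0 : ¬ 0 ≤ k := by rw [hke]; omega
        have hnk : -k = encI b i j := by rw [hke]; ring
        have hdec := encI_decode b i j hjn
        have hfd : PySem.Int.floordiv (-k) ((b.length : Int) + 1) = (i : Int) := by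
          rw [hnk]; exact hdec.1
        have hmd : PySem.Int.mod (-k) ((b.length : Int) + 1) = (j : Int) := by
          rw [hnk]; exact hdec.2
        have hdeps : ∀ d ∈ edDeps a b i j, memo.contains d = true := by
          intro d hd
          have := hD [] i j rest (by rw [hke]; rfl) hi1 him hj1 hjn d hd
          rcases this with h1 | h1 | h1
          · exact h1
          · simp at h1
          · simp at h1
        have hkeyform : (if k < 0 then -k else k) = -k := if_pos (by omega)
        have hd1 : -k - ((b.length : Int) + 1) - 1 = encI b (i-1) (j-1) := by
          rw [hnk]; exact enc_sub_w_one b i j hi1 hj1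
        have hd2 : -k - 1 = encI b i (j-1) := by
          rw [hnk]; exact enc_sub_one b i j hj1
        have hd3 : -k - ((b.length : Int) + 1) = encI b (i-1) j := by
          rw [hnk]; exact enc_sub_w b i j hi1
        by_cases hch : a.getD (i-1) default = b.getD (j-1) default
        · have hchp : pvCharAt a (PySem.Int.floordiv (-k) ((b.length : Int) + 1) - 1)
              = pvCharAt b (PySem.Int.mod (-k) ((b.length : Int) + 1) - 1) := by
            rw [hfd, hmd, pvCharAt_cast a i hi1 him, pvCharAt_cast b j hj1 hjn]
            exact hch
          rw [step_resolve_match a b k rest memo h0 hchp]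
          have hcont := hdeps (encI b (i-1) (j-1)) (by
            unfold edDeps
            rw [if_pos hch]
            exact List.mem_singleton.mpr rfl)
          obtain ⟨v, hv⟩ := Option.isSome_iff_exists.mp (contains_isSome memo _ hcont)
          have hvv : v = (gref a b (i-1) (j-1) : Int) := hM (i-1) (j-1) (by omega) (by omega) v hv
          have hgetD : (memo.get? (-k - ((b.length : Int) + 1) - 1)).getD 0
              = (gref a b (i-1) (j-1) : Int) := by
            rw [hd1, hv, hvv]
            rfl
          have hgref : gref a b i j = gref a b (i-1) (j-1) := by
            obtain ⟨i0, rfl⟩ : ∃ i0, i = i0 + 1 := ⟨i - 1, by omega⟩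
            obtain ⟨j0, rfl⟩ : ∃ j0, j = j0 + 1 := ⟨j - 1, by omega⟩
            simp only [Nat.add_sub_cancel] at hch ⊢
            rw [gref, if_pos hch]
          have hstep := main_insert_step a b N ih k rest memo i j
            ((memo.get? (-k - ((b.length : Int) + 1) - 1)).getD 0)
            (by rw [hkeyform]; exact hnk) hjn
            (by rw [hgetD, hgref]) hlerest hGrest hM hD
          rw [hkeyform] at hstep
          exact hstep
        · have hchp : ¬ pvCharAt a (PySem.Int.floordiv (-k) ((b.length : Int) + 1) - 1)
              = pvCharAt b (PySem.Int.mod (-k) ((b.length : Int) + 1) - 1) := by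
            rw [hfd, hmd, pvCharAt_cast a i hi1 him, pvCharAt_cast b j hj1 hjn]
            exact hch
          rw [step_resolve_mismatch a b k rest memo h0 hchp]
          have hdl : edDeps a b i j
              = [encI b (i-1) j, encI b i (j-1), encI b (i-1) (j-1)] := by
            unfold edDeps
            rw [if_neg hch]
          obtain ⟨v1, hv1⟩ := Option.isSome_iff_exists.mp (contains_isSome memo _
            (hdeps (encI b (i-1) j) (by rw [hdl]; simp)))
          obtain ⟨v2, hv2⟩ := Option.isSome_iff_exists.mp (contains_isSome memo _
            (hdeps (encI b i (j-1)) (by rw [hdl]; simp)))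
          obtain ⟨v3, hv3⟩ := Option.isSome_iff_exists.mp (contains_isSome memo _
            (hdeps (encI b (i-1) (j-1)) (by rw [hdl]; simp)))
          have hvv1 : v1 = (gref a b (i-1) j : Int) := hM (i-1) j (by omega) hjn v1 hv1
          have hvv2 : v2 = (gref a b i (j-1) : Int) := hM i (j-1) him (by omega) v2 hv2
          have hvv3 : v3 = (gref a b (i-1) (j-1) : Int) := hM (i-1) (j-1) (by omega) (by omega) v3 hv3
          have hval : 1 + min (min ((memo.get? (-k - ((b.length : Int) + 1))).getD 0)
                ((memo.get? (-k - 1)).getD 0)) ((memo.get? (-k - ((b.length : Int) + 1) - 1)).getD 0)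
              = (gref a b i j : Int) := by
            rw [hd1, hd3, hd2, hv1, hv2, hv3]
            simp only [Option.getD_some]
            rw [hvv1, hvv2, hvv3]
            obtain ⟨i0, rfl⟩ : ∃ i0, i = i0 + 1 := ⟨i - 1, by omega⟩
            obtain ⟨j0, rfl⟩ : ∃ j0, j = j0 + 1 := ⟨j - 1, by omega⟩
            simp only [Nat.add_sub_cancel] at hch ⊢
            rw [gref, if_neg hch]
            unfold pyMin3
            push_cast
            ring
          have hstep := main_insert_step a b N ih k rest memo i j
            (1 + min (min ((memo.get? (-k - ((b.length : Int) + 1))).getD 0)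
              ((memo.get? (-k - 1)).getD 0)) ((memo.get? (-k - ((b.length : Int) + 1) - 1)).getD 0))
            (by rw [hkeyform]; exact hnk) hjn
            hval hlerest hGrest hM hD
          rw [hkeyform] at hstep
          exact hstep

lemma B_val (s1 s2 : String) :
    distance_alt s1 s2 = ((gref s1.toList s2.toList s1.toList.length s2.toList.length : Nat) : Int) := by
  set a := s1.toList with ha
  set b := s2.toList with hb
  have hGood : ∀ k ∈ [encI b a.length b.length], GoodEntry a b k := by
    intro k hk
    simp only [List.mem_singleton] at hk
    exact Or.inl ⟨a.length, b.length, le_refl _, le_refl _, hk⟩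
  have hM0 : MemoInv a b PySem.Dict.empty := by
    intro i j _ _ v hv
    rw [PySem.Dict.get?_empty] at hv
    exact absurd hv (by simp)
  have hD0 : StackDeps a b [encI b a.length b.length] PySem.Dict.empty := by
    intro pre i j post heq hi1 him hj1 hjn d hd
    exfalso
    have hlen := congrArg List.length heq
    simp only [List.length_cons, List.length_append, List.length_nil] at hlen
    have hpre : pre = [] := List.eq_nil_of_length_eq_zero (by omega)
    subst hpre
    simp only [List.nil_append] at heq
    have hhead : encI b a.length b.length = -(encI b i j) := (List.cons_eq_cons.mp heq).1
    have h1 := encI_nonneg b a.length b.length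
    have h2 := encI_pos b i j hi1 hj1
    omega
  obtain ⟨hM', _, hC'⟩ := edLoopB_main a b (edStackW [encI b a.length b.length])
    [encI b a.length b.length] PySem.Dict.empty (le_refl _) hGood hM0 hD0
  have hcov := hC' (encI b a.length b.length) List.mem_cons_self
  rw [if_neg (by have := encI_nonneg b a.length b.length; omega)] at hcov
  obtain ⟨v, hv⟩ := Option.isSome_iff_exists.mp hcov
  have hvv : v = (gref a b a.length b.length : Int) :=
    hM' a.length b.length (le_refl _) (le_refl _) v hv
  have hlen1 : PySem.Str.len s1 = (a.length : Int) := by simp [ha]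
  have hlen2 : PySem.Str.len s2 = (b.length : Int) := by simp [hb]
  have hkeq : PySem.Str.len s1 * (PySem.Str.len s2 + 1) + PySem.Str.len s2
      = encI b a.length b.length := by
    rw [hlen1, hlen2]
    unfold encI
    ring
  show ((edLoopB a b [PySem.Str.len s1 * (PySem.Str.len s2 + 1) + PySem.Str.len s2]
      PySem.Dict.empty).get?
      (PySem.Str.len s1 * (PySem.Str.len s2 + 1) + PySem.Str.len s2)).getD 0
    = ((gref a b a.length b.length : Nat) : Int)
  rw [hkeq, hv, hvv]
  rfl

-- ========== A side ==========
lemma map_range_set {α : Type} (N k : Nat) (g : Nat → α) (v : α) (_hk : k < N) :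
    ((List.range N).map g).set k v = (List.range N).map (fun i => if i = k then v else g i) := by
  apply List.ext_getElem
  · simp
  · intro i h1 h2
    simp only [List.getElem_set, List.getElem_map, List.getElem_range]
    by_cases hik : k = i
    · subst hik; simp
    · simp [hik]; intro h; exact absurd h.symm hik

lemma fold_set_same (F : List Nat → Nat → List Nat) (js : List Nat) :
    ∀ dp : List (List Nat), 0 < dp.length →
      js.foldl (fun dp j => dp.set 0 (F (dp.getD 0 []) j)) dp
        = dp.set 0 (js.foldl F (dp.getD 0 [])) := by
  induction js with
  | nil =>
    intro dp h
    simp only [List.foldl_nil]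
    rw [List.getD_eq_getElem _ _ h, List.set_getElem_self]
  | cons j js ih =>
    intro dp h
    simp only [List.foldl_cons]
    rw [ih _ (by simpa using h)]
    have h1 : (dp.set 0 (F (dp.getD 0 []) j)).getD 0 [] = F (dp.getD 0 []) j := by
      rw [List.getD_eq_getElem?_getD, List.getElem?_set_self (by simpa using h)]
      rfl
    rw [h1, List.set_set]

lemma fold_set_row (i : Nat) (hi : 1 ≤ i) (F : List Nat → List Nat → Nat → List Nat)
    (js : List Nat) :
    ∀ dp : List (List Nat), i < dp.length →
      js.foldl (fun dp j => dp.set i (F (dp.getD (i-1) []) (dp.getD i []) j)) dp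
        = dp.set i (js.foldl (F (dp.getD (i-1) [])) (dp.getD i [])) := by
  induction js with
  | nil =>
    intro dp h
    simp only [List.foldl_nil]
    rw [List.getD_eq_getElem _ _ h, List.set_getElem_self]
  | cons j js ih =>
    intro dp h
    simp only [List.foldl_cons]
    rw [ih _ (by simpa using h)]
    have hne : i ≠ i - 1 := by omega
    have h1 : (dp.set i (F (dp.getD (i-1) []) (dp.getD i []) j)).getD (i-1) [] = dp.getD (i-1) [] := by
      rw [List.getD_eq_getElem?_getD, List.getElem?_set_ne hne, ← List.getD_eq_getElem?_getD]
    have h2 : (dp.set i (F (dp.getD (i-1) []) (dp.getD i []) j)).getD i []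
        = F (dp.getD (i-1) []) (dp.getD i []) j := by
      rw [List.getD_eq_getElem?_getD, List.getElem?_set_self (by simpa using h)]
      rfl
    rw [h1, h2, List.set_set]

-- phase 1: dp[i][0] = i
lemma phase1 (m n : Nat) : ∀ k, k ≤ m + 1 →
    (List.range k).foldl (fun dp i => dp.set i ((dp.getD i []).set 0 i))
        (List.replicate (m+1) (List.replicate (n+1) 0))
      = (List.range (m+1)).map (fun i =>
          if i < k then i :: List.replicate n 0 else List.replicate (n+1) 0) := by
  intro k
  induction k with
  | zero =>
    intro _
    simp [List.map_const']
  | succ k ih =>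
    intro hk
    rw [List.range_succ, List.foldl_append, ih (by omega), List.foldl_cons, List.foldl_nil]
    have hg : ((List.range (m+1)).map (fun i =>
        if i < k then i :: List.replicate n 0 else List.replicate (n+1) 0)).getD k []
        = List.replicate (n+1) 0 := by
      rw [PySem.List.getD_map_range _ _ _ _ (by omega : k < m+1)]
      simp
    rw [hg, show (List.replicate (n+1) (0:Nat)) = 0 :: List.replicate n 0 from rfl,
        List.set_cons_zero, map_range_set _ _ _ _ (by omega : k < m+1)]
    apply List.map_congr_left
    intro i hi
    by_cases h1 : i = k
    · subst h1; simp
    · by_cases h2 : i < k <;> simp [h1, h2] <;> omega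

-- phase 2 row: dp[0][j] = j
lemma phase2row (n : Nat) : ∀ k, k ≤ n + 1 →
    (List.range k).foldl (fun row j => row.set j j) (0 :: List.replicate n 0)
      = (List.range (n+1)).map (fun j => if j < k then j else 0) := by
  intro k
  induction k with
  | zero =>
    intro _
    simp [List.map_const']
    rfl
  | succ k ih =>
    intro hk
    rw [List.range_succ, List.foldl_append, ih (by omega), List.foldl_cons, List.foldl_nil,
        map_range_set _ _ _ _ (by omega : k < n+1)]
    apply List.map_congr_left
    intro j hj
    by_cases h1 : j = k
    · subst h1; simp
    · by_cases h2 : j < k <;> simp [h1, h2] <;> omega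

def stepRow (a b : List Char) (i : Nat) (prev row : List Nat) (j : Nat) : List Nat :=
  row.set j (if a.getD (i-1) default = b.getD (j-1) default then prev.getD (j-1) 0
             else pyMin3 (prev.getD j 0) (row.getD (j-1) 0) (prev.getD (j-1) 0) + 1)

-- phase 3, one row
lemma phase3row (a b : List Char) (i' n : Nat) (hn : n = b.length) : ∀ k, k ≤ n →
    (List.range' 1 k).foldl (stepRow a b (i'+1) (refRow a b i' n)) ((i'+1) :: List.replicate n 0)
      = (List.range (k+1)).map (gref a b (i'+1)) ++ List.replicate (n - k) 0 := by
  intro k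
  induction k with
  | zero =>
    intro _
    simp [gref_succ_zero]
  | succ k ih =>
    intro hk
    rw [show List.range' 1 (k+1) = List.range' 1 k ++ [1 + 1*k] from List.range'_concat,
        List.foldl_append, ih (by omega), List.foldl_cons, List.foldl_nil]
    have hlen : ((List.range (k+1)).map (gref a b (i'+1))).length = k + 1 := by simp
    unfold stepRow
    have e1 : (1 + 1*k) - 1 = k := by omega
    have e2 : 1 + 1*k = k + 1 := by omega
    rw [e1, e2]
    have hrk : (((List.range (k+1)).map (gref a b (i'+1)) ++ List.replicate (n-k) 0)).getD k 0
        = gref a b (i'+1) k := by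
      rw [List.getD_append _ _ _ _ (by omega), PySem.List.getD_map_range _ _ _ _ (by omega)]
    rw [hrk, refRow_getD a b i' n (k+1) (by omega), refRow_getD a b i' n k (by omega)]
    rw [List.set_append]
    rw [if_neg (by omega)]
    have hrep : List.replicate (n-k) (0:Nat) = 0 :: List.replicate (n-k-1) 0 := by
      rw [show n - k = (n-k-1) + 1 by omega]
      rfl
    rw [hrep, hlen, show k + 1 - (k+1) = 0 by omega, List.set_cons_zero]
    rw [show List.range (k+1+1) = List.range (k+1) ++ [k+1] from List.range_succ,
        List.map_append, List.append_assoc]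
    congr 1
    rw [show n - (k+1) = n - k - 1 from rfl]
    congr 1
    rw [gref, show i' + 1 - 1 = i' by omega]

def Dmat (a b : List Char) (m n k : Nat) : List (List Nat) :=
  (List.range (m+1)).map (fun i => if i ≤ k then refRow a b i n else i :: List.replicate n 0)

-- phase 3, whole matrix
lemma phase3 (a b : List Char) (m n : Nat) (hm : m = a.length) (hn : n = b.length) :
    ∀ k, k ≤ m →
    (List.range' 1 k).foldl (fun dp i =>
        (List.range' 1 n).foldl (fun dp j =>
          dp.set i ((dp.getD i []).set j
            (if a.getD (i-1) default = b.getD (j-1) default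
             then (dp.getD (i-1) []).getD (j-1) 0
             else pyMin3 ((dp.getD (i-1) []).getD j 0) ((dp.getD i []).getD (j-1) 0)
                    ((dp.getD (i-1) []).getD (j-1) 0) + 1))) dp)
      (Dmat a b m n 0)
      = Dmat a b m n k := by
  intro k
  induction k with
  | zero => intro _; rfl
  | succ k ih =>
    intro hk
    rw [show List.range' 1 (k+1) = List.range' 1 k ++ [1 + 1*k] from List.range'_concat,
        List.foldl_append, ih (by omega), List.foldl_cons, List.foldl_nil,
        show 1 + 1*k = k + 1 by omega]
    have hext := fold_set_row (k+1) (by omega) (stepRow a b (k+1)) (List.range' 1 n)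
      (Dmat a b m n k) (by simp [Dmat]; omega)
    have hshape : (List.range' 1 n).foldl (fun dp j =>
        dp.set (k+1) ((dp.getD (k+1) []).set j
          (if a.getD (k+1-1) default = b.getD (j-1) default
           then (dp.getD (k+1-1) []).getD (j-1) 0
           else pyMin3 ((dp.getD (k+1-1) []).getD j 0) ((dp.getD (k+1) []).getD (j-1) 0)
                  ((dp.getD (k+1-1) []).getD (j-1) 0) + 1))) (Dmat a b m n k)
        = (Dmat a b m n k).set (k+1)
            ((List.range' 1 n).foldl (stepRow a b (k+1) ((Dmat a b m n k).getD (k+1-1) []))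
              ((Dmat a b m n k).getD (k+1) [])) := hext
    rw [hshape]
    have hg1 : (Dmat a b m n k).getD (k+1-1) [] = refRow a b k n := by
      unfold Dmat
      rw [show k+1-1 = k from rfl, PySem.List.getD_map_range _ _ _ _ (by omega : k < m+1)]
      simp
    have hg2 : (Dmat a b m n k).getD (k+1) [] = (k+1) :: List.replicate n 0 := by
      unfold Dmat
      rw [PySem.List.getD_map_range _ _ _ _ (by omega : k+1 < m+1)]
      rw [if_neg (by omega)]
    rw [hg1, hg2, phase3row a b k n hn n (le_refl n)]
    unfold Dmat
    rw [map_range_set _ _ _ _ (by omega : k+1 < m+1)]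
    apply List.map_congr_left
    intro i hi
    by_cases h1 : i = k+1
    · subst h1
      rw [if_pos rfl, if_pos (by omega)]
      unfold refRow
      simp
    · by_cases h2 : i ≤ k
      · rw [if_neg h1, if_pos h2, if_pos (by omega)]
      · rw [if_neg h1, if_neg h2, if_neg (by omega)]

lemma A_val_list (a b : List Char) (m n : Nat) (hm : m = a.length) (hn : n = b.length) :
    (((List.range' 1 m).foldl
        (fun dp i => (List.range' 1 n).foldl (fun dp j =>
          dp.set i ((dp.getD i []).set j
            (if a.getD (i-1) default = b.getD (j-1) default
             then (dp.getD (i-1) []).getD (j-1) 0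
             else pyMin3 ((dp.getD (i-1) []).getD j 0) ((dp.getD i []).getD (j-1) 0)
                    ((dp.getD (i-1) []).getD (j-1) 0) + 1))) dp)
        ((List.range (n+1)).foldl (fun dp j => dp.set 0 ((dp.getD 0 []).set j j))
          ((List.range (m+1)).foldl (fun dp i => dp.set i ((dp.getD i []).set 0 i))
            (List.replicate (m+1) (List.replicate (n+1) 0))))).getD m []).getD n 0
      = gref a b m n := by
  rw [phase1 m n (m+1) (le_refl _)]
  have h1 : (List.range (m+1)).map (fun i =>
      if i < m + 1 then i :: List.replicate n 0 else List.replicate (n+1) 0)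
      = (List.range (m+1)).map (fun i => i :: List.replicate n 0) := by
    apply List.map_congr_left
    intro i hi
    rw [if_pos (by simp at hi; omega)]
  rw [h1]
  have h2 := fold_set_same (fun row j => row.set j j) (List.range (n+1))
    ((List.range (m+1)).map (fun i => i :: List.replicate n 0)) (by simp)
  rw [h2]
  have h3 : ((List.range (m+1)).map (fun i => i :: List.replicate n 0)).getD 0 []
      = 0 :: List.replicate n 0 :=
    PySem.List.getD_map_range _ _ _ _ (by omega)
  rw [h3, phase2row n (n+1) (le_refl _)]
  have h4 : (List.range (n+1)).map (fun j => if j < n + 1 then j else 0)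
      = refRow a b 0 n := by
    rw [refRow_zero]
    apply List.ext_getElem
    · simp
    · intro j hj1 hj2
      simp at hj1 ⊢
      omega
  rw [h4, map_range_set _ _ _ _ (by omega : 0 < m+1)]
  have h5 : (List.range (m+1)).map (fun i =>
      if i = 0 then refRow a b 0 n else i :: List.replicate n 0) = Dmat a b m n 0 := by
    unfold Dmat
    apply List.map_congr_left
    intro i hi
    by_cases h : i = 0
    · subst h; simp
    · rw [if_neg h, if_neg (by omega)]
  rw [h5, phase3 a b m n hm hn m (le_refl _)]
  have h6 : (Dmat a b m n m).getD m [] = refRow a b m n := by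
    unfold Dmat
    rw [PySem.List.getD_map_range _ _ _ _ (by omega : m < m+1), if_pos (le_refl _)]
  rw [h6, refRow_getD a b m n n (by omega)]

lemma A_val (s1 s2 : String) :
    edit_distance s1 s2 = gref s1.toList s2.toList s1.toList.length s2.toList.length := by
  unfold edit_distance
  exact A_val_list s1.toList s2.toList s1.toList.length s2.toList.length rfl rfl

-- ========== selection ==========
def stepA (key : String → Nat) (st : Option Nat × Option String) (label : String) :
    Option Nat × Option String :=
  match st.1 with
  | none => (some (key label), some label)
  | some md => if key label < md then (some (key label), some label) else st

lemma min?_cons_cons (key : String → Int) (a b : String) (t : List String) :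
    PySem.List.min? (a :: b :: t) key
      = PySem.List.min? ((if key b < key a then b else a) :: t) key := by
  unfold PySem.List.min?
  simp only [List.foldl_cons]
  by_cases h : key b < key a <;> simp [h]

lemma sel_fold (f : String → Nat) :
    ∀ (ls : List String) (d : Nat) (lbl : String), d = f lbl →
      (ls.foldl (stepA f) (some d, some lbl)).2
        = PySem.List.min? (lbl :: ls) (fun l => ((f l : Nat) : Int)) := by
  intro ls
  induction ls with
  | nil => intro d lbl h; rfl
  | cons x t ih =>
    intro d lbl h
    subst h
    simp only [List.foldl_cons]
    rw [min?_cons_cons]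
    have hcast : (((f x : Nat) : Int) < ((f lbl : Nat) : Int)) ↔ f x < f lbl := Nat.cast_lt
    by_cases hx : f x < f lbl
    · rw [if_pos (hcast.mpr hx)]
      simpa [stepA, hx] using ih _ _ rfl
    · rw [if_neg (fun hc => hx (hcast.mp hc))]
      simpa [stepA, hx] using ih _ _ rfl

theorem sel_eq (output : String) (label_set : List String) :
    optimize_output output label_set = optimize_output_alt output label_set := by
  unfold optimize_output optimize_output_alt
  have hkey : (fun label => distance_alt output label)
      = fun label => ((edit_distance output label : Nat) : Int) := by
    funext label
    rw [B_val, A_val]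
  rw [hkey]
  have hA : (fun (st : Option Nat × Option String) (label : String) =>
      let distance := edit_distance output label
      match st.1 with
      | none => (some distance, some label)
      | some md => if distance < md then (some distance, some label) else st)
      = stepA (fun l => edit_distance output l) := by
    funext st label
    rcases st with ⟨a, b⟩
    cases a <;> rfl
  rw [hA]
  cases label_set with
  | nil => rfl
  | cons x t =>
    simp only [List.foldl_cons, List.isEmpty_cons, if_neg (by simp : ¬(false = true))]
    have h0 : stepA (fun l => edit_distance output l) (none, none) x
        = (some (edit_distance output x), some x) := rfl
    rw [h0]
    exact sel_fold (fun l => edit_distance output l) t (edit_distance output x) x rfl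

-- ===== VERDICT (by name: the statement is the Claim_ definition above) =====
theorem optimize_output_spec : Claim_equal_optimize_output := by
  intro output label_set _
  unfold Spec_optimize_output
  exact sel_eq output label_set
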